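-- pv_equiv track=rewrite | github.com/superogira/WU2APRS | source_code_wu2aprs.py | nrzi_encode
-- ===== SOURCE A (Python) =====
-- def nrzi_encode(bits, initial=1):
--     cur = initial  # 1=mark, 0=space
--     out = []
--     for b in bits:
--         if b == 0:
--             cur ^= 1
--         out.append(cur)
--     return out
-- ===== SOURCE B (Python) =====
-- def nrzi_encode(bits, initial=1):
--     # pass 1: running count of zeros seen so far, one entry per bit
--     counts = []
--     c = 0
--     for b in bits:
--         if b == 0:
--             c += 1
--         counts.append(c)
--     # pass 2: each output level is initial XOR (parity of zeros seen so far)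
--     return [initial ^ (c & 1) for c in counts]
-- ===== Notes on version B (the rewrite author's own statement) =====
-- stated objective: alternative
-- what changed: Replaces A's single carried toggle-state with a staged pipeline: a first pass builds the table of cumulative zero-counts, a second mapping pass turns each count's parity into the level via initial XOR (c & 1).
import Mathlib
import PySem

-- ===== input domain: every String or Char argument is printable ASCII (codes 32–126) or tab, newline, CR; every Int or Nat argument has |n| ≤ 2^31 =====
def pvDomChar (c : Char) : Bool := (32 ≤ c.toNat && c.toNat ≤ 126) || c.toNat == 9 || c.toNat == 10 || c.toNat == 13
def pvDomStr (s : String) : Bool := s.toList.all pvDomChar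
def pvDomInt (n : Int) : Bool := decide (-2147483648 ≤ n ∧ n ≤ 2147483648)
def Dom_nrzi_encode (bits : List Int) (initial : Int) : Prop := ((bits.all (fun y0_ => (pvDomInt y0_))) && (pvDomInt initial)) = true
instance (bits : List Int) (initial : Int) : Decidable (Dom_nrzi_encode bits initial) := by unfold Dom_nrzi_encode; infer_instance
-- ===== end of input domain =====

-- B replaces A's single carried toggle state by a staged pipeline: a table of cumulative
-- zero-counts, then a mapping pass turning each count's parity into the level (objective: alternative).

-- Python `x ^ 1` on an int flips the lowest bit: exact for all ints (two's complement).
def pvXorOne (x : Int) : Int := if x % 2 == 0 then x + 1 else x - 1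

-- ===== PORT A =====
-- literal port of A: one fold carrying (cur, out), toggling cur when b == 0, appending cur
def nrzi_encode (bits : List Int) (initial : Int) : List Int :=
  (bits.foldl (fun (st : Int × List Int) b =>
      let cur := if b == 0 then pvXorOne st.1 else st.1
      (cur, st.2 ++ [cur])) (initial, [])).2

-- ===== PORT B =====
-- pass 1 of Source B: the running zero-count table, one entry per bit (built in order)
def pvZeroCounts : List Int → Int → List Int
  | [], _ => []
  | b :: bs, c =>
      let c' := if b == 0 then c + 1 else c
      c' :: pvZeroCounts bs c'

-- pass 2 of Source B: `initial ^ (c & 1)`; here c ≥ 0 so c & 1 = c % 2, and XOR with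
-- 0 is the identity while XOR with 1 is pvXorOne (exact for any int initial).
def nrzi_encode_alt (bits : List Int) (initial : Int) : List Int :=
  (pvZeroCounts bits 0).map (fun c => if c % 2 == 0 then initial else pvXorOne initial)

-- ===== PRECONDITION & SPEC =====
def Spec_nrzi_encode (bits : List Int) (initial : Int) (out : List Int) : Prop := out = nrzi_encode_alt bits initial
instance (bits : List Int) (initial : Int) (out : List Int) : Decidable (Spec_nrzi_encode bits initial out) := by unfold Spec_nrzi_encode; infer_instance

-- ===== CLAIM (what is proved, stated in full; the proofs are below) =====
def Claim_equal_nrzi_encode : Prop := ∀ (bits : List Int) (initial : Int), Dom_nrzi_encode bits initial → Spec_nrzi_encode bits initial (nrzi_encode bits initial)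

-- ===== LEMMAS AND PROOFS =====

theorem pvXorOne_xorOne (x : Int) : pvXorOne (pvXorOne x) = x := by
  unfold pvXorOne
  split_ifs with h1 h2 h2 <;> simp_all <;> omega

-- The NRZI level after c zeros, as B's mapping pass computes it.
def pvLevel (initial c : Int) : Int := if c % 2 == 0 then initial else pvXorOne initial

-- Toggling the level matches bumping the zero-count.
theorem step_parity (initial r : Int) :
    pvXorOne (pvLevel initial r) = pvLevel initial (r + 1) := by
  unfold pvLevel
  by_cases hr : r % 2 = 0
  · rw [if_pos (by simpa using hr), if_neg (by simp; omega)]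
  · rw [if_neg (by simpa using hr), if_pos (by simp; omega), pvXorOne_xorOne]

-- Invariant: A's fold, started at a level equal to pvLevel initial r, emits exactly
-- the pvLevel-image of B's zero-count table started at r, after the accumulator.
theorem nrzi_fold_eq (initial : Int) (bits : List Int) :
    ∀ (cur r : Int) (acc : List Int), cur = pvLevel initial r →
    (bits.foldl (fun (st : Int × List Int) b =>
        let cur := if b == 0 then pvXorOne st.1 else st.1
        (cur, st.2 ++ [cur])) (cur, acc)).2 =
      acc ++ (pvZeroCounts bits r).map (pvLevel initial) := by
  induction bits with
  | nil => intro cur r acc _; simp [pvZeroCounts]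
  | cons b bs ih =>
    intro cur r acc hcur
    simp only [List.foldl_cons, pvZeroCounts]
    by_cases hb : b = 0
    · subst hb
      have h1 : pvXorOne cur = pvLevel initial (r + 1) := by
        rw [hcur]; exact step_parity initial r
      simpa [h1, List.append_assoc] using
        ih (pvXorOne cur) (r + 1) (acc ++ [pvXorOne cur]) h1
    · have hb' : (b == 0) = false := by simp [hb]
      simpa [hb', List.append_assoc, hcur] using ih cur r (acc ++ [cur]) hcur

-- ===== VERDICT (by name: the statement is the Claim_ definition above) =====
theorem nrzi_encode_spec : Claim_equal_nrzi_encode := by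
  intro bits initial _
  unfold Spec_nrzi_encode nrzi_encode nrzi_encode_alt
  rw [nrzi_fold_eq initial bits initial 0 [] (by simp [pvLevel])]
  simp [pvLevel]
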